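-- pv_equiv track=rewrite | github.com/rmottus/advent-of-code | 2019/day_4/solution.py | check_adj_matching_digits
-- ===== SOURCE A (Python) =====
-- def check_adj_matching_digits(num: int):
--     digits = [ d for d in str(num) ]
--     cur_len = 1
--     for i in range (len(digits) - 1):
--         if digits[i] == digits[i+1]:
--             cur_len += 1
--         else:
--             if cur_len == 2:
--                 return True
--             cur_len = 1
--
--     return cur_len == 2
-- ===== SOURCE B (Python) =====
-- def check_adj_matching_digits(num: int):
--     chars = [None] + list(str(num)) + [None]
--     return any(b == c and a != b and c != d
--                for a, b, c, d in zip(chars, chars[1:], chars[2:], chars[3:]))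
-- ===== Notes on version B (the rewrite author's own statement) =====
-- stated objective: alternative
-- what changed: B replaces A's stateful run-length counter loop with a stateless sliding-window pattern match: it pads the digit characters with None sentinels and asks whether any window (a, b, c, d) of consecutive slots matches the pattern b == c, a != b, c != d, i.e. an adjacent equal pair not extendable on either side.
import Mathlib
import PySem

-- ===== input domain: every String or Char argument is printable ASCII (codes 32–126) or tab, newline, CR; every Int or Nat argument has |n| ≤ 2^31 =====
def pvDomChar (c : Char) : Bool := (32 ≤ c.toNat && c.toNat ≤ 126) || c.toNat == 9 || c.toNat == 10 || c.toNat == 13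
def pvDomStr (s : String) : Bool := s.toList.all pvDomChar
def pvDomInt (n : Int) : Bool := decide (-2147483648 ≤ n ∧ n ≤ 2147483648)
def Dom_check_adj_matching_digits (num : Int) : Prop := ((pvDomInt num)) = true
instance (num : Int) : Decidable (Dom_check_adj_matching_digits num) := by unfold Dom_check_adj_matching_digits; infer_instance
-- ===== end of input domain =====

-- B replaces A's stateful run-length counter loop with a stateless sliding-window pattern match
-- over the None-padded character list (objective: alternative algorithm, same cost).

-- ===== PORT A =====
-- the for-loop of A: i runs while i+1 < len(digits); early `return True` becomes returning `true`
def aGo (digits : List Char) (i : Nat) (cur : Int) : Bool :=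
  if _h : i + 1 < digits.length then
    if digits.getD i ' ' == digits.getD (i + 1) ' ' then
      aGo digits (i + 1) (cur + 1)
    else if cur == 2 then true
    else aGo digits (i + 1) 1
  else cur == 2
termination_by digits.length - i

def check_adj_matching_digits (num : Int) : Bool :=
  let digits := (PySem.Int.toStr num).toList
  aGo digits 0 1

-- ===== PORT B =====
-- the generator's body: b == c and a != b and c != d, on a quadruple produced by zip
def pvQuadHit (x : ((Option Char × Option Char) × Option Char) × Option Char) : Bool :=
  x.1.1.2 == x.1.2 && x.1.1.1 != x.1.1.2 && x.1.2 != x.2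

-- `chars = [None] + list(str(num)) + [None]`, then any(...) over zip(chars, chars[1:], chars[2:], chars[3:])
def check_adj_matching_digits_alt (num : Int) : Bool :=
  let s := (PySem.Int.toStr num).toList
  let chars : List (Option Char) := none :: s.map some ++ [none]
  (((chars.zip (chars.drop 1)).zip (chars.drop 2)).zip (chars.drop 3)).any pvQuadHit

-- ===== PRECONDITION & SPEC =====
def Spec_check_adj_matching_digits (num : Int) (out : Bool) : Prop := out = check_adj_matching_digits_alt num
instance (num : Int) (out : Bool) : Decidable (Spec_check_adj_matching_digits num out) := by unfold Spec_check_adj_matching_digits; infer_instance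

-- ===== CLAIM (what is proved, stated in full; the proofs are below) =====
def Claim_equal_check_adj_matching_digits : Prop := ∀ (num : Int), Dom_check_adj_matching_digits num → Spec_check_adj_matching_digits num (check_adj_matching_digits num)

-- ===== LEMMAS AND PROOFS =====

-- length of the maximal prefix of l consisting of the character c
def leadCount (c : Char) : List Char → Nat
  | [] => 0
  | x :: t => if x == c then leadCount c t + 1 else 0

-- the run-length decomposition of a character list
def runsOf : List Char → List Nat
  | [] => []
  | c :: t => (leadCount c t + 1) :: runsOf (t.drop (leadCount c t))
termination_by l => l.length
decreasing_by simp

theorem runsOf_nil : runsOf [] = [] := by rw [runsOf.eq_def]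

theorem runsOf_cons (c : Char) (t : List Char) :
    runsOf (c :: t) = (leadCount c t + 1) :: runsOf (t.drop (leadCount c t)) := by
  rw [runsOf.eq_def]

-- A's loop, reformulated on the tail list with the previous character carried along
def goL : List Char → Char → Int → Bool
  | [], _, cur => cur == 2
  | x :: t, prev, cur =>
    if prev == x then goL t x (cur + 1)
    else if cur == 2 then true
    else goL t x 1

theorem aGo_eq_goL (s : List Char) (i : Nat) (cur : Int) (h : i < s.length) :
    aGo s i cur = goL (s.drop (i + 1)) (s.getD i ' ') cur := by
  fun_induction aGo with
  | case1 i cur h1 heq ih =>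
    rw [List.drop_eq_getElem_cons h1, goL]
    rw [List.getD_eq_getElem _ _ h1] at heq
    rw [if_pos heq]
    rw [ih h1]
    rw [List.getD_eq_getElem _ _ h1]
  | case2 i cur h1 heq h2 =>
    rw [List.drop_eq_getElem_cons h1, goL]
    rw [List.getD_eq_getElem _ _ h1] at heq
    rw [if_neg heq]
    rw [if_pos h2]
  | case3 i cur h1 heq h2 ih =>
    rw [List.drop_eq_getElem_cons h1, goL]
    rw [List.getD_eq_getElem _ _ h1] at heq
    rw [if_neg heq]
    rw [if_neg h2]
    rw [ih h1]
    rw [List.getD_eq_getElem _ _ h1]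
  | case4 i cur h1 =>
    rw [List.drop_eq_nil_of_le (by omega), goL]

-- main combinatorial lemma on the A side: A's loop equals "2 occurs among the run lengths",
-- with the current run (prefix run of c, already counted to cur) treated separately
theorem goL_eq (t : List Char) (c : Char) (cur : Int) :
    goL t c cur
      = (decide (cur + (leadCount c t : Int) = 2)
          || (runsOf (t.drop (leadCount c t))).contains 2) := by
  match t with
  | [] =>
    have h0 : leadCount c [] = 0 := rfl
    rw [h0, List.drop_nil, runsOf_nil]
    by_cases hc : cur = 2 <;> simp [goL, hc]
  | x :: r =>
    by_cases hx : x = c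
    · subst hx
      have ih := goL_eq r x (cur + 1)
      rw [goL, if_pos (by simp), ih, leadCount, if_pos (by simp), List.drop_succ_cons]
      congr 1
      rw [decide_eq_decide]
      push_cast
      omega
    · have ih := goL_eq r x 1
      have hbx : (x == c) = false := by simpa [beq_iff_eq] using hx
      have hbc : (c == x) = false := by simp only [Bool.eq_false_iff, ne_eq, beq_iff_eq]; intro hc; exact hx hc.symm
      simp only [goL, leadCount, hbc, hbx, Bool.false_eq_true, if_false,
        Nat.cast_zero, add_zero, List.drop_zero, runsOf_cons, List.contains_cons]
      by_cases hcur : cur = 2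
      · simp [hcur]
      · rw [if_neg (by simpa [beq_iff_eq] using hcur), ih]
        rw [Bool.eq_iff_iff]
        simp only [Bool.or_eq_true, decide_eq_true_eq, beq_iff_eq]
        constructor
        · rintro (h1 | h2)
          · right; left; omega
          · right; right; exact h2
        · rintro (h0 | h1 | h2)
          · exact absurd (by omega : cur = 2) hcur
          · left; omega
          · right; exact h2
termination_by t.length

-- the quadruple list B zips up, as a proof-side abbreviation
def zq (l : List (Option Char)) :
    List (((Option Char × Option Char) × Option Char) × Option Char) :=
  ((l.zip (l.drop 1)).zip (l.drop 2)).zip (l.drop 3)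

-- B's any-over-windows, rewritten as a structural recursion
def w4 : List (Option Char) → Bool
  | a :: b :: c :: d :: t => (b == c && a != b && c != d) || w4 (b :: c :: d :: t)
  | _ => false

theorem zq_cons (a b c d : Option Char) (t : List (Option Char)) :
    zq (a :: b :: c :: d :: t) = (((a, b), c), d) :: zq (b :: c :: d :: t) := by
  simp [zq]

theorem any_zq_eq_w4 (l : List (Option Char)) : (zq l).any pvQuadHit = w4 l := by
  fun_induction w4 with
  | case1 a b c d t ih => rw [zq_cons, List.any_cons, ih, pvQuadHit]
  | case2 l h =>
    match l, h with
    | [], _ => rfl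
    | [_], _ => rfl
    | [_, _], _ => rfl
    | [_, _, _], _ => simp [zq, List.zip]
    | a :: b :: c :: d :: t, h => exact absurd rfl (h a b c d t)

-- inside a run no window fires: a duplicated head can be dropped
theorem w4_dup (x : Option Char) (l : List (Option Char)) :
    w4 (x :: x :: l) = w4 (x :: l) := by
  match l with
  | [] => rfl
  | [_] => rfl
  | a :: b :: t => simp [w4]

-- '2 occurs as this run length' in the two phrasings used below
theorem disj_norm (m : Nat) (b : Bool) :
    (decide (m = 1) || b) = ((2 == m + 1) || b) := by
  by_cases h : m = 1
  · simp [h]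
  · have h2 : (2 == m + 1) = false := by simp; omega
    simp [h, h2]

-- the two scanning states of B, proved together by strong induction on the tail:
-- CTX-state (first conjunct): `some c` is pure left context, its run already decided;
-- W-state (second conjunct): a fresh run of c starts, with left context p ≠ some c
theorem w4_states (n : Nat) :
    ∀ t : List Char, t.length ≤ n →
      (∀ c : Char,
        w4 (some c :: (t.map some ++ [none]))
          = (runsOf (t.drop (leadCount c t))).contains 2) ∧
      (∀ (c : Char) (p : Option Char), p ≠ some c →
        w4 (p :: (some c :: (t.map some ++ [none])))
          = (decide (leadCount c t = 1) || (runsOf (t.drop (leadCount c t))).contains 2)) := by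
  induction n with
  | zero =>
    intro t ht
    have h0 : t = [] := List.eq_nil_of_length_eq_zero (by omega)
    subst h0
    constructor
    · intro c
      simp only [List.map_nil, List.nil_append, leadCount, List.drop_nil, runsOf_nil]
      rfl
    · intro c p hp
      simp only [List.map_nil, List.nil_append, leadCount, List.drop_nil, runsOf_nil]
      rfl
  | succ n ih =>
    intro t ht
    constructor
    · -- CTX-state
      intro c
      match t with
      | [] =>
        simp only [List.map_nil, List.nil_append, leadCount, List.drop_nil, runsOf_nil]
        rfl
      | x :: r =>
        have hr : r.length ≤ n := by simp only [List.length_cons] at ht; omega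
        simp only [List.map_cons, List.cons_append]
        by_cases hx : x = c
        · subst hx
          rw [w4_dup (some x) (r.map some ++ [none]), (ih r hr).1 x]
          simp [leadCount]
        · have hW := (ih r hr).2 x (some c)
            (by intro h; exact hx (Option.some.inj h).symm)
          rw [hW]
          have hb : (x == c) = false := by simpa [beq_iff_eq] using hx
          rw [show leadCount c (x :: r) = 0 from by simp [leadCount, hb],
            List.drop_zero, runsOf_cons, List.contains_cons, disj_norm]
    · -- W-state
      intro c p hp
      have hpb : (p != some c) = true := by simpa using hp
      match t with
      | [] =>
        simp only [List.map_nil, List.nil_append]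
        rw [show w4 (p :: [some c, none]) = false from rfl]
        simp [leadCount, runsOf_nil]
      | x :: r =>
        have hr : r.length ≤ n := by simp only [List.length_cons] at ht; omega
        simp only [List.map_cons, List.cons_append]
        by_cases hx : x = c
        · subst hx
          match r with
          | [] =>
            simp only [List.map_nil, List.nil_append]
            simp only [w4, hpb]
            simp [leadCount, runsOf_nil]
          | y :: r' =>
            simp only [List.map_cons, List.cons_append]
            simp only [w4, hpb]
            rw [w4_dup (some x) (some y :: (List.map some r' ++ [none]))]
            have hC := (ih (y :: r') hr).1 x
            simp only [List.map_cons, List.cons_append] at hC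
            rw [hC]
            simp only [leadCount, if_pos (by simp : (x == x) = true), List.drop_succ_cons]
            by_cases hy : y = x
            · subst hy
              simp
            · have hb : (y == x) = false := by simpa [beq_iff_eq] using hy
              simp only [hb, Bool.false_eq_true, if_false]
              simp
              exact Or.inl (fun h => hy h.symm)
        · have hb : (some c == some x) = false := by
            simp only [Bool.eq_false_iff, ne_eq, beq_iff_eq]
            intro h; exact hx (Option.some.inj h).symm
          have hcb : (x == c) = false := by simpa [beq_iff_eq] using hx
          match r with
          | [] =>
            simp only [List.map_nil, List.nil_append]
            simp only [w4, hb]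
            simp [leadCount, hcb, runsOf_cons, runsOf_nil]
          | y :: r' =>
            have hW := (ih (y :: r') hr).2 x (some c)
              (by intro h; exact hx (Option.some.inj h).symm)
            simp only [List.map_cons, List.cons_append]
            simp only [w4, hb]
            simp only [List.map_cons, List.cons_append] at hW
            rw [hW]
            simp only [Bool.false_and, Bool.false_or]
            rw [show leadCount c (x :: y :: r') = 0 from by simp [leadCount, hcb],
              List.drop_zero, runsOf_cons, List.contains_cons, disj_norm]
            simp

-- ===== VERDICT (by name: the statement is the Claim_ definition above) =====
theorem check_adj_matching_digits_spec : Claim_equal_check_adj_matching_digits := by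
  intro num _
  unfold Spec_check_adj_matching_digits check_adj_matching_digits check_adj_matching_digits_alt
  have hB : ∀ chars : List (Option Char),
      (((chars.zip (chars.drop 1)).zip (chars.drop 2)).zip (chars.drop 3)).any pvQuadHit
        = w4 chars := fun chars => any_zq_eq_w4 chars
  cases hs : (PySem.Int.toStr num).toList with
  | nil =>
    simp only [List.map_nil, List.cons_append, List.nil_append]
    rw [hB]
    simp [aGo, w4]
  | cons c t =>
    simp only [List.map_cons, List.cons_append]
    rw [hB]
    have hW := (w4_states t.length t le_rfl).2 c none (by simp)
    rw [hW]
    rw [aGo_eq_goL _ _ _ (by simp), List.drop_succ_cons, List.drop_zero,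
      List.getD_cons_zero, goL_eq]
    congr 1
    rw [decide_eq_decide]
    omega
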